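-- pv_equiv track=rewrite | github.com/Joshua992700/ESEC-Portal | calculate_string_value.py | check_sum_parity
-- ===== SOURCE A (Python) =====
-- def calculate_string_value(s, m):
--     total = 1
--     for char in s:
--         total *= ord(char) ** m
--     return total
--
-- def check_sum_parity(s, m):
--     total_sum = 0
--     for string in s:
--         total_sum += calculate_string_value(string, m)
--
--     if total_sum % 2 == 0:
--         return "EVEN"
--     else:
--         return "ODD"
-- ===== SOURCE B (Python) =====
-- def check_sum_parity(s, m):
--     # Parity only: a term ord(c0)**m * ... is odd iff m == 0 or every ord is odd.
--     odd_terms = sum(1 for t in s if m == 0 or all(ord(c) % 2 for c in t))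
--     return "ODD" if odd_terms % 2 else "EVEN"
-- ===== Notes on version B (the rewrite author's own statement) =====
-- stated objective: faster
-- what changed: Instead of building huge big-int powers and summing them, B counts the strings whose term is odd (m == 0 or all char codes odd) and reads the answer off the count's parity.
-- outside the precondition, e.g. on check_sum_parity(['b'], -1): A returns 'ODD', B returns 'EVEN'; on check_sum_parity(['a'], -1): A returns 'ODD', B returns 'ODD'
import Mathlib
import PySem

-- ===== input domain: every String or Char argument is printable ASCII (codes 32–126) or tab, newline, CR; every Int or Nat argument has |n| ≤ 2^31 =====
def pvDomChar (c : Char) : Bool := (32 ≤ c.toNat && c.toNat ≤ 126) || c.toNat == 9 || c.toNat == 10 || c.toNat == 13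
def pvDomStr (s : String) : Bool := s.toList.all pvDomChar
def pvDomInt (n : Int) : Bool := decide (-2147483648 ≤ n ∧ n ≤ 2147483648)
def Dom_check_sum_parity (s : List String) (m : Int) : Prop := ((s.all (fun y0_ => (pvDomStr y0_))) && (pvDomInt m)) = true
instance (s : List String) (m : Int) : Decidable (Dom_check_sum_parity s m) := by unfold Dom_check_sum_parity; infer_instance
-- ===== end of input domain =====

-- B replaces A's big-int power-and-sum with a single pass counting odd terms (a term is odd iff m = 0
-- or every char code is odd) and returns the count's parity: asymptotically faster, same answer.


-- ===== PORT A =====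
-- total = 1; for char in s: total *= ord(char) ** m   (Pre_ restricts to m ≥ 0, where ** is integer power)
def calculate_string_value (s : String) (m : Int) : Int :=
  s.toList.foldl (fun total c => total * ((c.toNat : Int)) ^ m.toNat) 1

def check_sum_parity (s : List String) (m : Int) : String :=
  let total_sum := s.foldl (fun acc t => acc + calculate_string_value t m) 0
  if PySem.Int.mod total_sum 2 = 0 then "EVEN" else "ODD"

-- ===== PORT B =====
def check_sum_parity_alt (s : List String) (m : Int) : String :=
  let odd_terms :=
    (s.filter (fun t => m == 0 || t.toList.all (fun c => c.toNat % 2 == 1))).length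
  if odd_terms % 2 = 1 then "ODD" else "EVEN"

-- ===== PRECONDITION & SPEC =====
-- Pre_ excludes m < 0, where Python's ** yields floats and A's answer is an accident of float rounding.
def Pre_check_sum_parity (s : List String) (m : Int) : Prop := 0 ≤ m
instance (s : List String) (m : Int) : Decidable (Pre_check_sum_parity s m) := by unfold Pre_check_sum_parity; infer_instance
def pvWitness_check_sum_parity : List String × Int := (["ab", "c"], 3)

def Spec_check_sum_parity (s : List String) (m : Int) (out : String) : Prop := out = check_sum_parity_alt s m
instance (s : List String) (m : Int) (out : String) : Decidable (Spec_check_sum_parity s m out) := by unfold Spec_check_sum_parity; infer_instance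

-- ===== CLAIM (what is proved, stated in full; the proofs are below) =====
def Claim_equal_check_sum_parity : Prop := ∀ (s : List String) (m : Int), Dom_check_sum_parity s m → Pre_check_sum_parity s m → Spec_check_sum_parity s m (check_sum_parity s m)

-- ===== LEMMAS AND PROOFS =====

-- foldl of multiplication is the initial value times the product of the mapped factors
theorem foldl_mul_eq (g : Char → Int) (l : List Char) : ∀ (a : Int),
    l.foldl (fun t c => t * g c) a = a * (l.map g).prod := by
  induction l with
  | nil => intro a; simp
  | cons c tl ih => intro a; simp [ih, mul_assoc]

-- parity of a product of k-th powers: odd iff k = 0 or every base is odd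
theorem prod_parity (k : Nat) (l : List Char) :
    ((l.map (fun c => ((c.toNat : Int)) ^ k)).prod) % 2 =
      (if (k == 0 : Bool) || l.all (fun c => c.toNat % 2 == 1) then 1 else 0) := by
  induction l with
  | nil => simp
  | cons c tl ih =>
    rw [List.map_cons, List.prod_cons, Int.mul_emod, ih]
    by_cases hk : k = 0
    · subst hk; simp
    · have hpow : ((c.toNat : Int)) ^ k % 2 = (c.toNat : Int) % 2 := by
        rcases Int.even_or_odd (c.toNat : Int) with he | ho
        · rw [Int.even_iff.mp ((Int.even_pow' hk).mpr he), Int.even_iff.mp he]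
        · rw [Int.odd_iff.mp (Odd.pow ho), Int.odd_iff.mp ho]
      rw [hpow]
      have hk' : (k == 0 : Bool) = false := by simpa using hk
      simp only [hk', Bool.false_or, List.all_cons]
      by_cases hc : (c.toNat % 2 == 1) = true <;>
        by_cases ht : (tl.all (fun c => c.toNat % 2 == 1)) = true <;>
          simp only [hc, ht, if_true, Bool.true_and, Bool.false_and] <;>
            simp only [beq_iff_eq] at hc <;> simp <;> omega

-- parity of one term: odd iff m = 0 or all char codes odd (for m ≥ 0, the Pre_ region)
theorem calc_mod_two (t : String) (m : Int) (hm : 0 ≤ m) :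
    calculate_string_value t m % 2 =
      (if m == 0 || t.toList.all (fun c => c.toNat % 2 == 1) then 1 else 0) := by
  unfold calculate_string_value
  rw [foldl_mul_eq, one_mul, prod_parity]
  have : (m.toNat == 0 : Bool) = (m == 0) := by
    rw [Bool.eq_iff_iff]; simp only [beq_iff_eq, Int.toNat_eq_zero]; omega
  rw [this]

theorem sum_parity (s : List String) (m : Int) (hm : 0 ≤ m) :
    (s.foldl (fun acc t => acc + calculate_string_value t m) 0) % 2 =
      ((s.filter (fun t => m == 0 || t.toList.all (fun c => c.toNat % 2 == 1))).length : Int) % 2 := by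
  rw [PySem.List.foldl_add, zero_add]
  induction s with
  | nil => rfl
  | cons h tl ih =>
    rw [List.map_cons, List.sum_cons, List.filter_cons, Int.add_emod, calc_mod_two h m hm, ih]
    by_cases hc : (m == 0 || h.toList.all (fun c => c.toNat % 2 == 1)) = true <;>
      simp only [hc, if_true, List.length_cons] <;> push_cast <;> omega

-- ===== VERDICT (by name: the statement is the Claim_ definition above) =====
theorem check_sum_parity_spec : Claim_equal_check_sum_parity := by
  intro s m _hd hpre
  show check_sum_parity s m = _
  simp only [check_sum_parity, check_sum_parity_alt]
  rw [PySem.Int.mod_eq_emod_of_pos (by norm_num)]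
  rw [sum_parity s m hpre]
  generalize (s.filter (fun t => m == 0 || t.toList.all (fun c => c.toNat % 2 == 1))).length = k
  rcases Nat.even_or_odd k with ⟨j, hj⟩ | ⟨j, hj⟩ <;> subst hj
  · rw [if_pos (by omega), if_neg (by omega)]
  · rw [if_neg (by omega), if_pos (by omega)]
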